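-- pv_equiv track=rewrite | github.com/amonraknight/pythoncodes | 2048-DQN/game/game_logic.py | score_monotone_for_rows
-- ===== SOURCE A (Python) =====
-- def score_monotone_for_rows(mat):
--     rst_score = 0
--     # For each row
--     for each_row in mat:
--         previous_item = 0
--         previous_tone = 'unknown'
--         for index, each_item in enumerate(each_row):
--             if each_item != 0 and index > 0:
--                 if previous_item != 0 and previous_tone == 'unknown':
--                     if previous_item > each_item:
--                         previous_tone = 'dec'
--                     elif previous_item < each_item:
--                         previous_tone = 'inc'
--                 elif previous_tone == 'inc':
--                     if previous_item > each_item: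
--                         rst_score += 1
--                         previous_tone = 'dec'
--                 elif previous_tone == 'dec':
--                     if previous_item < each_item:
--                         rst_score += 1
--                         previous_tone = 'inc'
--
--             if each_item != 0:
--                 previous_item = each_item
--
--     return rst_score
-- ===== SOURCE B (Python) =====
-- def score_monotone_for_rows(mat):
--     total = 0
--     for row in mat:
--         nz = [x for x in row if x != 0]
--         signs = [1 if a < b else -1 for a, b in zip(nz, nz[1:]) if a != b]
--         total += sum(1 for s, t in zip(signs, signs[1:]) if s != t)
--     return total
-- ===== Notes on version B (the rewrite author's own statement) =====
-- stated objective: simpler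
-- what changed: Replaced A's single-pass inc/dec/unknown string state machine (with index and previous-item bookkeeping) by a per-row pipeline: filter out zeros, map adjacent unequal pairs to +1/-1 signs, then count adjacent sign flips.
import Mathlib
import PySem

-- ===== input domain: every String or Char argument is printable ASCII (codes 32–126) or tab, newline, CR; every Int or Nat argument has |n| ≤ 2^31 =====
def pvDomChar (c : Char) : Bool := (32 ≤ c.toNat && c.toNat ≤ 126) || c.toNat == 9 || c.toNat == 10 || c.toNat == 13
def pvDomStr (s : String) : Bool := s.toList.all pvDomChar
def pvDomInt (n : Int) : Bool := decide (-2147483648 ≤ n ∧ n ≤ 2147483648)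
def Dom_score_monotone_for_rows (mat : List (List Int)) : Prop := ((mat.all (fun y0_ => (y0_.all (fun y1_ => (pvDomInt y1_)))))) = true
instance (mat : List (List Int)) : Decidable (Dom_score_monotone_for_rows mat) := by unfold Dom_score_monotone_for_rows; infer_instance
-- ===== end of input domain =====

-- B replaces A's single-pass inc/dec/unknown state machine per row by a filter-nonzeros,
-- map-adjacent-pairs-to-signs, count-adjacent-sign-flips pipeline (objective: simpler).

-- ===== PORT A =====
-- inner loop of A: 'for index, each_item in enumerate(each_row)' with state (rst_score, previous_item, previous_tone)
def rowLoopA : Nat → Int → Int → String → List Int → Int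
  | _, rst, _, _, [] => rst
  | index, rst, prev, tone, item :: rest =>
      let st :=
        if item ≠ 0 ∧ index > 0 then
          if prev ≠ 0 ∧ tone = "unknown" then
            if prev > item then (rst, "dec")
            else if prev < item then (rst, "inc")
            else (rst, tone)
          else if tone = "inc" then
            if prev > item then (rst + 1, "dec") else (rst, tone)
          else if tone = "dec" then
            if prev < item then (rst + 1, "inc") else (rst, tone)
          else (rst, tone)
        else (rst, tone)
      let prev' := if item ≠ 0 then item else prev
      rowLoopA (index + 1) st.1 prev' st.2 rest

def score_monotone_for_rows (mat : List (List Int)) : Int :=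
  mat.foldl (fun rst_score each_row => rowLoopA 0 rst_score 0 "unknown" each_row) 0

-- ===== PORT B =====
def score_monotone_for_rows_alt (mat : List (List Int)) : Int :=
  mat.foldl (fun total row =>
    let nz := row.filter (fun x => x ≠ 0)
    let signs := ((nz.zip nz.tail).filter (fun p => p.1 ≠ p.2)).map
      (fun p => if p.1 < p.2 then (1 : Int) else -1)
    total + (((signs.zip signs.tail).filter (fun p => p.1 ≠ p.2)).length : Int)) 0

-- ===== PRECONDITION & SPEC =====
def Spec_score_monotone_for_rows (mat : List (List Int)) (out : Int) : Prop := out = score_monotone_for_rows_alt mat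
instance (mat : List (List Int)) (out : Int) : Decidable (Spec_score_monotone_for_rows mat out) := by unfold Spec_score_monotone_for_rows; infer_instance

-- ===== CLAIM (what is proved, stated in full; the proofs are below) =====
def Claim_equal_score_monotone_for_rows : Prop := ∀ (mat : List (List Int)), Dom_score_monotone_for_rows mat → Spec_score_monotone_for_rows mat (score_monotone_for_rows mat)

-- ===== LEMMAS AND PROOFS =====

-- sign of a strict adjacent pair
def sgn (a b : Int) : Int := if a < b then 1 else -1

-- the sign list a row induces: skip zeros, skip equal consecutive nonzeros
def signsAux : Option Int → List Int → List Int
  | _, [] => []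
  | p, x :: xs =>
      if x = 0 then signsAux p xs
      else match p with
        | none => signsAux (some x) xs
        | some a => if a = x then signsAux (some x) xs else sgn a x :: signsAux (some x) xs

-- flip counter over a sign list, with optional previous sign
def flipCount : Option Int → List Int → Int
  | _, [] => 0
  | none, t :: ts => flipCount (some t) ts
  | some s, t :: ts => (if s = t then 0 else 1) + flipCount (some t) ts

-- B's adjacent-pair sign pipeline, named
def pairSigns (l : List Int) : List Int :=
  ((l.zip l.tail).filter (fun p => p.1 ≠ p.2)).map (fun p => if p.1 < p.2 then (1 : Int) else -1)

-- B's flip count pipeline, named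
def cnt (l : List Int) : Int :=
  (((l.zip l.tail).filter (fun p => p.1 ≠ p.2)).length : Int)

theorem pairSigns_cons (x y : Int) (r : List Int) :
    pairSigns (x :: y :: r) = (if x = y then pairSigns (y :: r) else sgn x y :: pairSigns (y :: r)) := by
  by_cases h : x = y <;> simp [pairSigns, sgn, h]

theorem signsAux_some (l : List Int) : ∀ a : Int,
    signsAux (some a) l = pairSigns (a :: l.filter (fun x => x ≠ 0)) := by
  induction l with
  | nil => intro a; simp [signsAux, pairSigns]
  | cons x xs ih =>
      intro a
      by_cases hx : x = 0
      · simp [signsAux, hx, ih]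
      · by_cases hax : a = x <;>
          simp [signsAux, hx, hax, ih, pairSigns_cons]

theorem signsAux_none (l : List Int) :
    signsAux none l = pairSigns (l.filter (fun x => x ≠ 0)) := by
  induction l with
  | nil => simp [signsAux, pairSigns]
  | cons x xs ih =>
      by_cases hx : x = 0
      · simp [signsAux, hx, ih]
      · simp [signsAux, hx, signsAux_some]

theorem cnt_cons (s : Int) (sl : List Int) : cnt (s :: sl) = flipCount (some s) sl := by
  induction sl generalizing s with
  | nil => simp [cnt, flipCount]
  | cons t ts ih =>
      by_cases h : s = t <;>
        · simp [cnt, flipCount, h, ← ih t, cnt]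
          try omega

theorem cnt_eq_flipCount (sl : List Int) : cnt sl = flipCount none sl := by
  cases sl with
  | nil => simp [cnt, flipCount]
  | cons t ts => simp [flipCount, cnt_cons]

-- the state correspondence for A's machine
def RepS (tone : String) (prev : Int) (sOpt : Option Int) : Prop :=
  (tone = "unknown" ∧ sOpt = none) ∨
  (tone = "inc" ∧ sOpt = some 1 ∧ prev ≠ 0) ∨
  (tone = "dec" ∧ sOpt = some (-1) ∧ prev ≠ 0)

theorem rowLoopA_eq (rest : List Int) : ∀ (i : Nat) (rst prev : Int) (tone : String) (sOpt : Option Int),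
    0 < i → RepS tone prev sOpt →
    rowLoopA i rst prev tone rest =
      rst + flipCount sOpt (signsAux (if prev = 0 then none else some prev) rest) := by
  induction rest with
  | nil => intro i rst prev tone sOpt hi _; simp [rowLoopA, flipCount, signsAux]
  | cons x xs ih =>
      intro i rst prev tone sOpt hi hrep
      by_cases hx : x = 0
      · -- zero item: everything skipped
        subst hx
        have step : rowLoopA i rst prev tone (0 :: xs) = rowLoopA (i+1) rst prev tone xs := by
          simp [rowLoopA]
        rw [step, ih (i+1) rst prev tone sOpt (by omega) hrep]
        by_cases hp : prev = 0 <;> simp [signsAux, hp]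
      · rcases hrep with ⟨ht, hs⟩ | ⟨ht, hs, hp⟩ | ⟨ht, hs, hp⟩
        · -- tone unknown
          subst ht hs
          by_cases hp : prev = 0
          · -- no previous nonzero yet: just record prev
            have step : rowLoopA i rst prev "unknown" (x :: xs) = rowLoopA (i+1) rst x "unknown" xs := by
              simp [rowLoopA, hx, hi, hp]
            rw [step, ih (i+1) rst x "unknown" none (by omega) (by exact Or.inl ⟨rfl, rfl⟩)]
            simp [signsAux, hx, hp]
          · -- previous nonzero, tone unknown: establish the tone (or stay on equality)
            rcases lt_trichotomy prev x with hlt | heq | hgt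
            · have step : rowLoopA i rst prev "unknown" (x :: xs) = rowLoopA (i+1) rst x "inc" xs := by
                simp [rowLoopA, hx, hi, hp, hlt]
                rw [if_neg (by omega : ¬ x < prev)]
              rw [step, ih (i+1) rst x "inc" (some 1) (by omega) (by exact Or.inr (Or.inl ⟨rfl, rfl, hx⟩))]
              simp [signsAux, hx, hp]
              rw [if_neg (by omega : ¬ prev = x), show sgn prev x = 1 from by unfold sgn; rw [if_pos hlt]]
              simp [flipCount]
            · have step : rowLoopA i rst prev "unknown" (x :: xs) = rowLoopA (i+1) rst x "unknown" xs := by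
                simp [rowLoopA, hx, hi, hp]
                rw [if_neg (by omega : ¬ x < prev), if_neg (by omega : ¬ prev < x)]
              rw [step, ih (i+1) rst x "unknown" none (by omega) (by exact Or.inl ⟨rfl, rfl⟩)]
              simp [signsAux, hx, hp]
              rw [if_pos heq]
            · have step : rowLoopA i rst prev "unknown" (x :: xs) = rowLoopA (i+1) rst x "dec" xs := by
                simp [rowLoopA, hx, hi, hp, hgt]
              rw [step, ih (i+1) rst x "dec" (some (-1)) (by omega) (by exact Or.inr (Or.inr ⟨rfl, rfl, hx⟩))]
              simp [signsAux, hx, hp]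
              rw [if_neg (by omega : ¬ prev = x), show sgn prev x = -1 from by unfold sgn; rw [if_neg (by omega : ¬ prev < x)]]
              simp [flipCount]
        · -- tone inc
          subst ht hs
          rcases lt_trichotomy prev x with hlt | heq | hgt
          · have step : rowLoopA i rst prev "inc" (x :: xs) = rowLoopA (i+1) rst x "inc" xs := by
              simp [rowLoopA, hx, hi]
              rw [if_neg (by omega : ¬ x < prev)]
            rw [step, ih (i+1) rst x "inc" (some 1) (by omega) (by exact Or.inr (Or.inl ⟨rfl, rfl, hx⟩))]
            simp [signsAux, hx, hp]
            rw [if_neg (by omega : ¬ prev = x), show sgn prev x = 1 from by unfold sgn; rw [if_pos hlt]]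
            simp [flipCount]
          · have step : rowLoopA i rst prev "inc" (x :: xs) = rowLoopA (i+1) rst x "inc" xs := by
              simp [rowLoopA, hx, hi]
              rw [if_neg (by omega : ¬ x < prev)]
            rw [step, ih (i+1) rst x "inc" (some 1) (by omega) (by exact Or.inr (Or.inl ⟨rfl, rfl, hx⟩))]
            simp [signsAux, hx, hp]
            rw [if_pos heq]
          · have step : rowLoopA i rst prev "inc" (x :: xs) = rowLoopA (i+1) (rst+1) x "dec" xs := by
              simp [rowLoopA, hx, hi, hgt]
            rw [step, ih (i+1) (rst+1) x "dec" (some (-1)) (by omega) (by exact Or.inr (Or.inr ⟨rfl, rfl, hx⟩))]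
            simp [signsAux, hx, hp]
            rw [if_neg (by omega : ¬ prev = x), show sgn prev x = -1 from by unfold sgn; rw [if_neg (by omega : ¬ prev < x)]]
            simp [flipCount]
            omega
        · -- tone dec
          subst ht hs
          rcases lt_trichotomy prev x with hlt | heq | hgt
          · have step : rowLoopA i rst prev "dec" (x :: xs) = rowLoopA (i+1) (rst+1) x "inc" xs := by
              simp [rowLoopA, hx, hi, hlt]
            rw [step, ih (i+1) (rst+1) x "inc" (some 1) (by omega) (by exact Or.inr (Or.inl ⟨rfl, rfl, hx⟩))]
            simp [signsAux, hx, hp]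
            rw [if_neg (by omega : ¬ prev = x), show sgn prev x = 1 from by unfold sgn; rw [if_pos hlt]]
            simp [flipCount]
            omega
          · have step : rowLoopA i rst prev "dec" (x :: xs) = rowLoopA (i+1) rst x "dec" xs := by
              simp [rowLoopA, hx, hi]
              rw [if_neg (by omega : ¬ prev < x)]
            rw [step, ih (i+1) rst x "dec" (some (-1)) (by omega) (by exact Or.inr (Or.inr ⟨rfl, rfl, hx⟩))]
            simp [signsAux, hx, hp]
            rw [if_pos heq]
          · have step : rowLoopA i rst prev "dec" (x :: xs) = rowLoopA (i+1) rst x "dec" xs := by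
              simp [rowLoopA, hx, hi]
              rw [if_neg (by omega : ¬ prev < x)]
            rw [step, ih (i+1) rst x "dec" (some (-1)) (by omega) (by exact Or.inr (Or.inr ⟨rfl, rfl, hx⟩))]
            simp [signsAux, hx, hp]
            rw [if_neg (by omega : ¬ prev = x), show sgn prev x = -1 from by unfold sgn; rw [if_neg (by omega : ¬ prev < x)]]
            simp [flipCount]

-- one full row of A equals rst + B's per-row count
theorem rowA_eq_rowB (row : List Int) (rst : Int) :
    rowLoopA 0 rst 0 "unknown" row = rst + cnt (pairSigns (row.filter (fun x => x ≠ 0))) := by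
  cases row with
  | nil => simp [rowLoopA, pairSigns, cnt]
  | cons x xs =>
      have hg : ¬ (x ≠ 0 ∧ (0:Nat) > 0) := by simp
      by_cases hx : x = 0
      · simp only [rowLoopA, if_neg hg, if_neg (by tauto : ¬ x ≠ 0)]
        rw [rowLoopA_eq xs 1 rst 0 "unknown" none (by omega) (by exact Or.inl ⟨rfl, rfl⟩)]
        rw [cnt_eq_flipCount, ← signsAux_none]
        simp [signsAux, hx]
      · simp only [rowLoopA, if_neg hg, if_pos hx]
        rw [rowLoopA_eq xs 1 rst x "unknown" none (by omega) (by exact Or.inl ⟨rfl, rfl⟩)]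
        rw [cnt_eq_flipCount, ← signsAux_none]
        simp [signsAux, hx]

theorem fold_eq (mat : List (List Int)) : ∀ acc : Int,
    mat.foldl (fun rst_score each_row => rowLoopA 0 rst_score 0 "unknown" each_row) acc =
    mat.foldl (fun total row =>
      let nz := row.filter (fun x => x ≠ 0)
      let signs := ((nz.zip nz.tail).filter (fun p => p.1 ≠ p.2)).map
        (fun p => if p.1 < p.2 then (1 : Int) else -1)
      total + (((signs.zip signs.tail).filter (fun p => p.1 ≠ p.2)).length : Int)) acc := by
  induction mat with
  | nil => intro acc; rfl
  | cons r rs ih =>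
      intro acc
      simp only [List.foldl_cons]
      rw [rowA_eq_rowB r acc, ih]
      rfl

-- ===== VERDICT (by name: the statement is the Claim_ definition above) =====
theorem score_monotone_for_rows_spec : Claim_equal_score_monotone_for_rows := by
  intro mat _
  unfold Spec_score_monotone_for_rows score_monotone_for_rows score_monotone_for_rows_alt
  exact fold_eq mat 0
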